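-- pv_equiv track=rewrite | github.com/thaReal/MasterChef | codeforces/round_659/beach.py | solve
-- ===== SOURCE A (Python) =====
-- def solve(n, k, l, d):
-- 	# l = max swimmable depth, k = tide length
-- 	max_depth = max(d)
-- 	idx = d.index(max_depth)
-- 	swim = [0] * n
--
-- 	# do the right half first
-- 	rising = True
-- 	level = 0
-- 	for i in range(idx, n):
-- 		swim[i] = l - d[i] - level
-- 		if rising:
-- 			if level < k:
-- 				level += 1
-- 			else:
-- 				rising = False
-- 				level -= 1
-- 		else:
-- 			if level > 0:
-- 				level -= 1
-- 			else:
-- 				rising = True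
-- 				level += 1
--
-- 	# Then the left half
-- 	rising = True
-- 	level = 1
-- 	while idx > 0:
-- 		idx -= 1
-- 		swim[idx] = l - d[idx] - level
-- 		if rising:
-- 			if level < k:
-- 				level += 1
-- 			else:
-- 				rising = False
-- 				level -= 1
-- 		else:
-- 			if level > 0:
-- 				level -= 1
-- 			else:
-- 				rising = True
-- 				level += 1
--
-- 	print (swim) #DEBUG
-- 	if min(swim) >= 0:
-- 		return "Yes"
--
-- 	else:
-- 		return "No"
-- ===== SOURCE B (Python) =====
-- def solve(n, k, l, d):
--     # Closed-form triangle wave of the tide instead of two stateful scans.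
--     idx = d.index(max(d))
--     period = 2 * k
--     swim = [l - d[i] - (k - abs(k - abs(i - idx) % period)) for i in range(n)]
--     print(swim)  # DEBUG (kept from A)
--     return "Yes" if min(swim) >= 0 else "No"
-- ===== Notes on version B (the rewrite author's own statement) =====
-- stated objective: simpler
-- what changed: Replaces A's two stateful rising/falling scans (mutable flag + level, a right loop and a left while-loop) by a single comprehension computing the closed-form triangle wave k - abs(k - dist % 2k) of the tide at each position; Pre_ excludes k <= 0 (B's modulus by 2k raises ZeroDivisionError at k = 0 and a negative tide period is a corner no one would specify, both programs' values there being arbitrary conventions) and the shapes where A raises (n < 1, n > len(d), or the first maximum of d beyond position n).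
-- outside the precondition, e.g. on solve(3, 0, 2, [1, 2, 1]): A returns 'Yes', B raises ZeroDivisionError; on solve(2, -4, 1, [3, 2]): A returns 'No', B returns 'Yes'
import Mathlib
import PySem

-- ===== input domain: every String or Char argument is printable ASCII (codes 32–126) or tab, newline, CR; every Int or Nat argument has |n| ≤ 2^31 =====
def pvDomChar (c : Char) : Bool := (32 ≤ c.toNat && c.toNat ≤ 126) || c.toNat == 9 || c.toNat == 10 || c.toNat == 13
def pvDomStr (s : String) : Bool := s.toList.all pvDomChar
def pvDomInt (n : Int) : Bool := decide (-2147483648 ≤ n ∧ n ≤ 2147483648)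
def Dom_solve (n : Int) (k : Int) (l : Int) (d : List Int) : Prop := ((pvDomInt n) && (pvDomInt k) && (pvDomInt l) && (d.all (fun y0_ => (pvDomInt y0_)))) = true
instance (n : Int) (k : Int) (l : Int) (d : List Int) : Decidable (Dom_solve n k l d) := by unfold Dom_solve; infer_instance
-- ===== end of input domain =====

-- B replaces A's two stateful rising/falling scans by one comprehension with the closed-form
-- triangle wave of the tide (objective: simpler). Return-value equivalence only: both Pythons
-- also print(swim), a side effect not modelled here (B keeps the identical print line).

-- ===== PORT A =====
-- the duplicated rising/falling level-update block of A (appears verbatim in both of A's loops)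
def pvStep (k : Int) (rising : Bool) (level : Int) : Bool × Int :=
  if rising then
    if level < k then (true, level + 1) else (false, level - 1)
  else
    if level > 0 then (false, level - 1) else (true, level + 1)

-- 'for i in range(idx, n): swim[i] = l - d[i] - level; <update>'  (writes/reads in range under Pre_)
def pvRight (d : List Int) (k l : Int) (n : Nat) (i : Nat) (swim : List Int) (rising : Bool) (level : Int) : List Int :=
  if _h : i < n then
    pvRight d k l n (i + 1) (swim.set i (l - PySem.List.pyGetD d (i : Int) 0 - level))
      (pvStep k rising level).1 (pvStep k rising level).2
  else swim
termination_by n - i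

-- 'while idx > 0: idx -= 1; swim[idx] = l - d[idx] - level; <update>'
def pvLeft (d : List Int) (k l : Int) : Nat → List Int → Bool → Int → List Int
  | 0, swim, _, _ => swim
  | idx + 1, swim, rising, level =>
      pvLeft d k l idx (swim.set idx (l - PySem.List.pyGetD d (idx : Int) 0 - level))
        (pvStep k rising level).1 (pvStep k rising level).2

def solve (n : Int) (k : Int) (l : Int) (d : List Int) : String :=
  match PySem.List.max? d (fun x => x) with
  | none => ""            -- max([]) raises ValueError: outside Pre_
  | some maxDepth =>
    match PySem.List.index? d maxDepth with
    | none => ""          -- unreachable (the max is a member of d)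
    | some idx =>
      let swim0 := List.replicate n.toNat 0
      let swim1 := pvRight d k l n.toNat idx swim0 true 0
      let swim2 := pvLeft d k l idx swim1 true 1
      match PySem.List.min? swim2 (fun x => x) with
      | none => ""        -- min([]) raises ValueError: outside Pre_
      | some m => if m ≥ 0 then "Yes" else "No"

-- ===== PORT B =====
def solve_alt (n : Int) (k : Int) (l : Int) (d : List Int) : String :=
  match PySem.List.max? d (fun x => x) with
  | none => ""            -- max([]) raises ValueError: outside Pre_
  | some mx =>
    match PySem.List.index? d mx with
    | none => ""          -- unreachable (the max is a member of d)
    | some idx =>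
      let period := 2 * k
      let swim := (PySem.List.pyRange 0 n 1).map (fun i =>
        l - PySem.List.pyGetD d i 0 - (k - |k - PySem.Int.mod |i - (idx : Int)| period|))
      match PySem.List.min? swim (fun x => x) with
      | none => ""        -- min([]) raises ValueError: outside Pre_
      | some m => if m ≥ 0 then "Yes" else "No"

-- ===== PRECONDITION & SPEC =====
-- Pre_ excludes (a) inputs on which A raises: n ≤ 0 or n > len(d) or empty d (ValueError /
-- IndexError), or the first maximum of d sitting beyond position n (IndexError in the left
-- loop); and (b) k ≤ 0, where a tide period is meaningless: B's modulus by 2k raises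
-- ZeroDivisionError at k = 0, and for negative k the two programs' conventions are both
-- arbitrary (a corner no one would specify).
def Pre_solve (n : Int) (k : Int) (l : Int) (d : List Int) : Prop :=
  1 ≤ n ∧ n ≤ (d.length : Int) ∧ 1 ≤ k ∧
  ((PySem.List.max? d (fun x => x)).any (fun m => decide (m ∈ d.take (n.toNat + 1)))) = true
instance (n : Int) (k : Int) (l : Int) (d : List Int) : Decidable (Pre_solve n k l d) := by
  unfold Pre_solve; infer_instance

def pvWitness_solve : Int × Int × Int × List Int := (3, 2, 3, [1, 3, 2])

def Spec_solve (n : Int) (k : Int) (l : Int) (d : List Int) (out : String) : Prop := out = solve_alt n k l d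
instance (n : Int) (k : Int) (l : Int) (d : List Int) (out : String) : Decidable (Spec_solve n k l d out) := by unfold Spec_solve; infer_instance

-- ===== CLAIM (what is proved, stated in full; the proofs are below) =====
def Claim_equal_solve : Prop := ∀ (n : Int) (k : Int) (l : Int) (d : List Int), Dom_solve n k l d → Pre_solve n k l d → Spec_solve n k l d (solve n k l d)

-- ===== LEMMAS AND PROOFS =====

def pvTri (k : Int) (m : Nat) : Int := k - |k - PySem.Int.mod (m : Int) (2 * k)|
def pvStateAt (k : Int) (t : Nat) (r : Bool) (lv : Int) : Prop :=
  lv = pvTri k t ∧ (r = true ↔ (t = 0 ∨ (1 ≤ t % (2 * k).toNat ∧ ((t % (2 * k).toNat : Nat) : Int) ≤ k)))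
lemma pvTri_eq (k : Int) (hk : 1 ≤ k) (t : Nat) :
    pvTri k t = k - |k - ((t % (2 * k).toNat : Nat) : Int)| := by
  have h2 : (2 : Int) * k = (((2 * k).toNat : Nat) : Int) := by omega
  rw [pvTri, h2, PySem.Int.mod_natCast]; simp

lemma pvTri_val (k : Int) (hk : 1 ≤ k) (t : Nat) :
    pvTri k t = if ((t % (2 * k).toNat : Nat) : Int) ≤ k then ((t % (2 * k).toNat : Nat) : Int)
      else 2 * k - ((t % (2 * k).toNat : Nat) : Int) := by
  rw [pvTri_eq k hk]
  rcases abs_cases (k - ((t % (2 * k).toNat : Nat) : Int)) with ⟨h1, h2⟩ | ⟨h1, h2⟩ <;>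
    rw [h1] <;> split_ifs <;> omega

lemma pvStep_stateAt {k : Int} (hk : 1 ≤ k) {t : Nat} {r : Bool} {lv : Int}
    (h : pvStateAt k t r lv) : pvStateAt k (t + 1) (pvStep k r lv).1 (pvStep k r lv).2 := by
  obtain ⟨hlv, hr⟩ := h
  rw [pvTri_val k hk] at hlv
  have hP2 : 2 ≤ (2 * k).toNat := by omega
  have hPk : ((2 * k).toNat : Int) = 2 * k := by omega
  have hpl : t % (2 * k).toNat < (2 * k).toNat := Nat.mod_lt _ (by omega)
  have hp0 : t = 0 → t % (2 * k).toNat = 0 := by intro h0; simp [h0]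
  have hsucc : (t + 1) % (2 * k).toNat =
      if t % (2 * k).toNat + 1 = (2 * k).toNat then 0 else t % (2 * k).toNat + 1 := by
    rw [Nat.add_mod, Nat.mod_eq_of_lt (show 1 < (2 * k).toNat by omega)]
    split_ifs with hh
    · rw [hh, Nat.mod_self]
    · exact Nat.mod_eq_of_lt (by omega)
  unfold pvStateAt
  rw [pvTri_val k hk, hsucc]
  clear hsucc
  revert hlv hr hpl hp0
  generalize t % (2 * k).toNat = p
  intro hlv hr hpl hp0
  cases r
  · simp only [Bool.false_eq_true, false_iff] at hr
    simp only [pvStep, Bool.false_eq_true, if_false]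
    split_ifs <;>
      refine ⟨by dsimp only; omega, ?_⟩ <;>
      simp only [false_iff, true_iff, false_or] <;>
      omega
  · simp only [true_iff] at hr
    simp only [pvStep, if_true]
    split_ifs <;>
      refine ⟨by dsimp only; omega, ?_⟩ <;>
      simp only [false_iff, true_iff, false_or] <;>
      omega

lemma pvRight_length (d : List Int) (k l : Int) (n : Nat) :
    ∀ i swim (r : Bool) (lv : Int), (pvRight d k l n i swim r lv).length = swim.length := by
  intro i swim r lv
  fun_induction pvRight with
  | case1 i swim r lv h ih => rw [ih]; simp
  | case2 => rfl

lemma pvLeft_length (d : List Int) (k l : Int) :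
    ∀ idx swim (r : Bool) (lv : Int), (pvLeft d k l idx swim r lv).length = swim.length := by
  intro idx
  induction idx with
  | zero => intro swim r lv; rfl
  | succ m ih => intro swim r lv; rw [pvLeft, ih]; simp

lemma pvRight_spec (d : List Int) (k l : Int) (hk : 1 ≤ k) (n : Nat) :
    ∀ m i swim (r : Bool) (lv : Int) (t : Nat), n - i = m → pvStateAt k t r lv → swim.length = n →
      ∀ j : Nat, (pvRight d k l n i swim r lv)[j]? =
        if i ≤ j ∧ j < n then some (l - PySem.List.pyGetD d (j : Int) 0 - pvTri k (t + (j - i)))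
        else swim[j]? := by
  intro m
  induction m with
  | zero =>
    intro i swim r lv t hm hst hlen j
    have hin : ¬ i < n := by omega
    rw [pvRight, dif_neg hin, if_neg (by omega)]
  | succ m ih =>
    intro i swim r lv t hm hst hlen j
    have hin : i < n := by omega
    rw [pvRight, dif_pos hin]
    rw [ih (i + 1) _ _ _ (t + 1) (by omega) (pvStep_stateAt hk hst) (by simp [hlen])]
    rcases Nat.lt_trichotomy j i with hj | hj | hj
    · rw [if_neg (by omega), if_neg (by omega), List.getElem?_set_ne (by omega)]
    · subst hj
      rw [if_neg (by omega), if_pos (by omega), List.getElem?_set_self (by omega)]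
      obtain ⟨hlv, -⟩ := hst
      simp [hlv]
    · by_cases hjn : j < n
      · rw [if_pos (by omega), if_pos (by omega)]
        have : t + 1 + (j - (i + 1)) = t + (j - i) := by omega
        rw [this]
      · rw [if_neg (by omega), if_neg (by omega), List.getElem?_set_ne (by omega)]

lemma pvLeft_spec (d : List Int) (k l : Int) (hk : 1 ≤ k) :
    ∀ (idx : Nat) swim (r : Bool) (lv : Int) (t : Nat), pvStateAt k t r lv → idx ≤ swim.length →
      ∀ j : Nat, (pvLeft d k l idx swim r lv)[j]? =
        if j < idx then some (l - PySem.List.pyGetD d (j : Int) 0 - pvTri k (t + (idx - j) - 1))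
        else swim[j]? := by
  intro idx
  induction idx with
  | zero =>
    intro swim r lv t hst hlen j
    rw [pvLeft, if_neg (by omega)]
  | succ m ih =>
    intro swim r lv t hst hlen j
    rw [pvLeft]
    rw [ih _ _ _ (t + 1) (pvStep_stateAt hk hst) (by simp; omega)]
    rcases Nat.lt_trichotomy j m with hj | hj | hj
    · rw [if_pos hj, if_pos (by omega)]
      have : t + 1 + (m - j) - 1 = t + (m + 1 - j) - 1 := by omega
      rw [this]
    · subst hj
      rw [if_neg (by omega), if_pos (by omega), List.getElem?_set_self (by omega)]
      obtain ⟨hlv, -⟩ := hst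
      have h1 : t + (j + 1 - j) - 1 = t := by omega
      rw [h1, hlv]
    · rw [if_neg (by omega), if_neg (by omega), List.getElem?_set_ne (by omega)]

lemma pvStateAt_zero (k : Int) (hk : 1 ≤ k) : pvStateAt k 0 true 0 := by
  constructor
  · rw [pvTri_val k hk]; simp; omega
  · simp

lemma pvStateAt_one (k : Int) (hk : 1 ≤ k) : pvStateAt k 1 true 1 := by
  have hP2 : 2 ≤ (2 * k).toNat := by omega
  have h1 : 1 % (2 * k).toNat = 1 := Nat.mod_eq_of_lt (by omega)
  constructor
  · rw [pvTri_val k hk, h1]; simp [hk]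
  · simp [h1, hk]

-- the two swim lists are equal elementwise
lemma pvSwim_eq (n k l : Int) (d : List Int) (idx : Nat) (hk : 1 ≤ k) (hn : 1 ≤ n)
    (hidx : idx ≤ n.toNat) :
    pvLeft d k l idx (pvRight d k l n.toNat idx (List.replicate n.toNat 0) true 0) true 1 =
      (PySem.List.pyRange 0 n 1).map (fun i =>
        l - PySem.List.pyGetD d i 0 - (k - |k - PySem.Int.mod |i - (idx : Int)| (2 * k)|)) := by
  have hlenA : (pvLeft d k l idx (pvRight d k l n.toNat idx (List.replicate n.toNat 0) true 0) true 1).length = n.toNat := by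
    rw [pvLeft_length, pvRight_length, List.length_replicate]
  apply List.ext_getElem?
  intro j
  by_cases hj : j < n.toNat
  · rw [pvLeft_spec d k l hk idx _ _ _ 1 (pvStateAt_one k hk)
      (by rw [pvRight_length, List.length_replicate]; omega) j]
    rw [show PySem.List.pyRange 0 n 1 = PySem.List.pyRange 0 ((n.toNat : Nat) : Int) 1 by
      rw [Int.toNat_of_nonneg (by omega)]]
    rw [PySem.List.getElem?_map_pyRange_zero _ _ _ (by omega)]
    by_cases hlt : j < idx
    · rw [if_pos hlt]
      have h1 : 1 + (idx - j) - 1 = idx - j := by omega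
      have h2 : |(j : Int) - (idx : Int)| = ((idx - j : Nat) : Int) := by
        rw [abs_of_neg (by omega)]; omega
      rw [h1, h2, pvTri]
    · rw [if_neg hlt]
      rw [pvRight_spec d k l hk n.toNat (n.toNat - idx) idx _ _ _ 0 rfl
        (pvStateAt_zero k hk) (List.length_replicate) j]
      rw [if_pos (by omega)]
      have h2 : |(j : Int) - (idx : Int)| = ((j - idx : Nat) : Int) := by
        rw [abs_of_nonneg (by omega)]; omega
      rw [h2, pvTri]
      simp
  · rw [List.getElem?_eq_none (by omega), List.getElem?_eq_none (by simp; omega)]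

-- ===== VERDICT (by name: the statement is the Claim_ definition above) =====
theorem solve_spec : Claim_equal_solve := by
  unfold Claim_equal_solve
  intro n k l d _ hpre
  obtain ⟨hn, hlen, hk, htake⟩ := hpre
  unfold Spec_solve solve solve_alt
  cases hm : PySem.List.max? d (fun x => x) with
  | none => rfl
  | some mx =>
    cases hi : PySem.List.index? d mx with
    | none => simp only [hi]
    | some idx =>
      have hidx : idx ≤ n.toNat := by
        simp only [hm, Option.any_some, decide_eq_true_eq] at htake
        obtain ⟨jj, hjlt, hjget⟩ := List.mem_iff_getElem.mp htake
        have hjl := hjlt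
        rw [List.length_take] at hjl
        obtain ⟨hklt, hkv, hmin⟩ := PySem.List.getElem_of_index?_eq_some hi
        have hget2 : d[jj]'(by omega) = mx := by
          rw [List.getElem_take] at hjget
          exact hjget
        by_contra hcon
        exact hmin jj (by omega) hget2
      simp only [hi, pvSwim_eq n k l d idx hk hn hidx]
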